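-- pv_equiv track=rewrite | github.com/EmmaAspland/Sim.Pro.Flow | Sim.Pro.Flow/src/simulation.py | condense_patterns
-- ===== SOURCE A (Python) =====
-- def condense_patterns(letters, capacity_pattern_dict):
--     """Combines capacity for multiples of acitvity.
--
--     If data was formatted using double codes - Get capacity and merge to general single code
--     """
--     pattern_dict = {}
--     for letter in letters:
--         activity_pattern = []
--         pattern = [0 for i in range(7)]
--         for code, values in capacity_pattern_dict.items():
--             if code[0] == letter:
--                 activity_pattern.append(values)
--         for l in range(len(activity_pattern)):
--             pattern = [sum(x) for x in zip(pattern, activity_pattern[l])]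
--         pattern_dict[letter] = pattern
--     return pattern_dict
-- ===== SOURCE B (Python) =====
-- def condense_patterns(letters, capacity_pattern_dict):
--     # Single pass over the capacity dict, accumulating into per-letter zero vectors.
--     acc = {letter: [0] * 7 for letter in letters}
--     for code, values in capacity_pattern_dict.items():
--         cur = acc.get(code[0])
--         if cur is not None:
--             acc[code[0]] = [a + b for a, b in zip(cur, values)]
--     return acc
-- ===== Notes on version B (the rewrite author's own statement) =====
-- stated objective: faster
-- what changed: Instead of rescanning the whole capacity dict once per letter, B makes a single pass over the capacity dict, accumulating each vector into a pre-built per-letter zero-vector dict.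
-- outside the precondition, e.g. on condense_patterns([], {'': [1]}): A returns {}, B raises IndexError
import Mathlib
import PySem

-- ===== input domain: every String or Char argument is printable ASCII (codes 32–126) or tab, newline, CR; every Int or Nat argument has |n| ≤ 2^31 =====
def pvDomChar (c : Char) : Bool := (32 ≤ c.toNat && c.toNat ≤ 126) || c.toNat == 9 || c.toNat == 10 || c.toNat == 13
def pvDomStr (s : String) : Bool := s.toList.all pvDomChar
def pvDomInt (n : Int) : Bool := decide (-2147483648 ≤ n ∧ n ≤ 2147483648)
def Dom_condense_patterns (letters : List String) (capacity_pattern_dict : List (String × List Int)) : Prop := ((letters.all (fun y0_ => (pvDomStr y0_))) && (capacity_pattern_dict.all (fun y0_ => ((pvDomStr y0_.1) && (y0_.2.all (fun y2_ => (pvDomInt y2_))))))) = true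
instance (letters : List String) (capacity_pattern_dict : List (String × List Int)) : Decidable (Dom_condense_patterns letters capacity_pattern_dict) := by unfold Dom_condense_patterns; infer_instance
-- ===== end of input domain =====

-- B replaces A's per-letter rescans of the capacity dict by one pass grouping on code[0]; equivalence of return values.
-- ===== PORT A =====
def pyZipSum (p v : List Int) : List Int := (p.zip v).map (fun ab => ab.1 + ab.2)

def condense_patterns (letters : List String) (capacity_pattern_dict : List (String × List Int)) : List (String × List Int) :=
  (letters.foldl (fun (pattern_dict : PySem.Dict String (List Int)) letter =>
    let activity_pattern : List (List Int) := capacity_pattern_dict.foldl (fun acc cv =>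
      match PySem.Str.pyGet? cv.1 0 with  -- code[0]; none = IndexError, excluded by Pre_
      | some c => if String.ofList [c] == letter then acc ++ [cv.2] else acc
      | none => acc) []
    let pattern := activity_pattern.foldl (fun p v => pyZipSum p v) (List.replicate 7 0)
    pattern_dict.insert letter pattern) PySem.Dict.empty).items

-- ===== PORT B =====
def condense_patterns_alt (letters : List String) (capacity_pattern_dict : List (String × List Int)) : List (String × List Int) :=
  let init : PySem.Dict String (List Int) :=
    letters.foldl (fun d l => d.insert l (List.replicate 7 0)) PySem.Dict.empty
  (capacity_pattern_dict.foldl (fun d cv =>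
    match PySem.Str.pyGet? cv.1 0 with  -- code[0]; none = IndexError, excluded by Pre_
    | some c =>
      match d.get? (String.ofList [c]) with
      | some cur => d.insert (String.ofList [c]) ((cur.zip cv.2).map (fun ab => ab.1 + ab.2))
      | none => d
    | none => d) init).items

-- ===== PRECONDITION & SPEC =====
-- Pre_ excludes inputs containing an empty code string: Python A raises IndexError at code[0] for any nonempty letters, and B, which always scans the capacity dict, raises IndexError there even when letters is empty (where A returns {}).
def Pre_condense_patterns (letters : List String) (capacity_pattern_dict : List (String × List Int)) : Prop :=
  ∀ cv ∈ capacity_pattern_dict, cv.1 ≠ ""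
instance (letters : List String) (capacity_pattern_dict : List (String × List Int)) : Decidable (Pre_condense_patterns letters capacity_pattern_dict) := by unfold Pre_condense_patterns; infer_instance
def pvWitness_condense_patterns : List String × (List (String × List Int)) :=
  (["a", "b"], [("ab", [1, 2, 3, 4, 5, 6, 7]), ("ac", [1, 1, 1]), ("ba", [2, 0, 2])])
def Spec_condense_patterns (letters : List String) (capacity_pattern_dict : List (String × List Int)) (out : List (String × List Int)) : Prop := out = condense_patterns_alt letters capacity_pattern_dict
instance (letters : List String) (capacity_pattern_dict : List (String × List Int)) (out : List (String × List Int)) : Decidable (Spec_condense_patterns letters capacity_pattern_dict out) := by unfold Spec_condense_patterns; infer_instance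

-- ===== CLAIM (what is proved, stated in full; the proofs are below) =====
def Claim_equal_condense_patterns : Prop := ∀ (letters : List String) (capacity_pattern_dict : List (String × List Int)), Dom_condense_patterns letters capacity_pattern_dict → Pre_condense_patterns letters capacity_pattern_dict → Spec_condense_patterns letters capacity_pattern_dict (condense_patterns letters capacity_pattern_dict)

-- ===== LEMMAS AND PROOFS =====
-- the boolean test "code[0] == letter" (false where code is empty)
def matchB (letter : String) (cv : String × List Int) : Bool :=
  match PySem.Str.pyGet? cv.1 0 with
  | some c => String.ofList [c] == letter
  | none => false

-- B's per-letter accumulated value over a list of entries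
def accF (l : String) (p : List Int) (cpd : List (String × List Int)) : List Int :=
  (cpd.filter (matchB l)).foldl (fun q cv => pyZipSum q cv.2) p

-- characterisation of B's single pass: each entry of the dict accumulates exactly its matching vectors
theorem mainB (cpd : List (String × List Int)) :
    ∀ (d : PySem.Dict String (List Int)), d.keys.Nodup →
    (cpd.foldl (fun d cv =>
      match PySem.Str.pyGet? cv.1 0 with
      | some c =>
        match d.get? (String.ofList [c]) with
        | some cur => d.insert (String.ofList [c]) (((cur.zip cv.2).map (fun ab => ab.1 + ab.2)))
        | none => d
      | none => d) d).items = d.items.map (fun e => (e.1, accF e.1 e.2 cpd)) := by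
  induction cpd with
  | nil =>
    intro d hd
    simp [accF]
  | cons cv rest ih =>
    intro d hd
    rw [List.foldl_cons]
    rcases hc : PySem.Str.pyGet? cv.1 0 with _ | c
    · simp only [hc]
      rw [ih d hd]
      apply List.map_congr_left
      rintro ⟨e1, e2⟩ he
      have hm : matchB e1 cv = false := by unfold matchB; rw [hc]
      simp [accF, List.filter_cons, hm]
    · simp only [hc]
      rcases hg : d.get? (String.ofList [c]) with _ | cur
      · simp only [hg]
        rw [ih d hd]
        apply List.map_congr_left
        rintro ⟨e1, e2⟩ he
        have hke : e1 ∈ d.keys := PySem.Dict.mem_keys_of_mem_items d he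
        have hne : String.ofList [c] ≠ e1 := by
          intro h
          rw [h] at hg
          exact (PySem.Dict.get?_eq_none_iff_not_mem_keys d e1).mp hg hke
        have hm : matchB e1 cv = false := by
          unfold matchB
          rw [hc]
          simpa using hne
        simp [accF, List.filter_cons, hm]
      · simp only [hg]
        have hcont : d.contains (String.ofList [c]) = true := by
          rw [PySem.Dict.contains_eq_isSome_get?, hg]; rfl
        have hkeys : (d.insert (String.ofList [c]) (((cur.zip cv.2).map (fun ab => ab.1 + ab.2)))).keys = d.keys :=
          PySem.Dict.keys_insert_of_contains d (((cur.zip cv.2).map (fun ab => ab.1 + ab.2))) hcont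
        rw [ih _ (by rw [hkeys]; exact hd)]
        rw [PySem.Dict.items_insert_of_contains d (((cur.zip cv.2).map (fun ab => ab.1 + ab.2))) hcont, List.map_map]
        apply List.map_congr_left
        rintro ⟨e1, e2⟩ he
        by_cases hek : e1 = String.ofList [c]
        · have h1 : d.get? (String.ofList [c]) = some e2 := by
            rw [← hek]
            exact PySem.Dict.get?_of_mem_items d he hd
          rw [hg] at h1
          have hcur : cur = e2 := by injection h1
          have hm : matchB e1 cv = true := by unfold matchB; rw [hc]; simp [hek]
          rw [hek] at hm
          simp [accF, pyZipSum, List.filter_cons, hm, hcur, hek]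
        · have hm : matchB e1 cv = false := by
            unfold matchB
            rw [hc]
            simpa using fun h => hek h.symm
          have hb : (e1 == String.ofList [c]) = false := by simpa using hek
          simp [accF, List.filter_cons, hm, hek]

-- A's letter loop inserting g(l) equals B's zero-vector init loop mapped through g
theorem mainA (g : String → List Int) (letters : List String) :
    ∀ (dA dB : PySem.Dict String (List Int)),
    dA.items = dB.items.map (fun e => (e.1, g e.1)) →
    (letters.foldl (fun pd l => pd.insert l (g l)) dA).items
      = ((letters.foldl (fun d l => d.insert l (List.replicate 7 0)) dB).items).map (fun e => (e.1, g e.1)) := by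
  induction letters with
  | nil => intro dA dB h; simpa using h
  | cons l rest ih =>
    intro dA dB h
    rw [List.foldl_cons, List.foldl_cons]
    apply ih
    have hkeys : dA.keys = dB.keys := by
      show dA.items.map (·.1) = dB.items.map (·.1)
      rw [h, List.map_map]
      rfl
    have hcont : dA.contains l = dB.contains l := by
      rw [PySem.Dict.contains_eq_decide_mem_keys, PySem.Dict.contains_eq_decide_mem_keys, hkeys]
    by_cases hc : dB.contains l = true
    · rw [PySem.Dict.items_insert_of_contains dA (g l) (by rw [hcont]; exact hc),
          PySem.Dict.items_insert_of_contains dB (List.replicate 7 0) hc, h,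
          List.map_map, List.map_map]
      apply List.map_congr_left
      rintro ⟨p1, p2⟩ hp
      by_cases hpl : p1 = l
      · simp [Function.comp, hpl]
      · have hb : (p1 == l) = false := by simpa using hpl
        simp [Function.comp, hb]
    · have hc' : dB.contains l = false := by simpa using hc
      rw [PySem.Dict.items_insert_of_not_contains dA (g l) (by rw [hcont]; exact hc'),
          PySem.Dict.items_insert_of_not_contains dB (List.replicate 7 0) hc', h,
          List.map_append]
      simp

-- every value of B's initial dict is the zero vector
theorem init_vals (letters : List String) :
    ∀ (d : PySem.Dict String (List Int)), (∀ e ∈ d.items, e.2 = List.replicate 7 0) →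
    ∀ e ∈ (letters.foldl (fun d l => d.insert l (List.replicate 7 0)) d).items, e.2 = List.replicate 7 0 := by
  induction letters with
  | nil => intro d h; simpa using h
  | cons l rest ih =>
    intro d h
    rw [List.foldl_cons]
    apply ih
    intro e he
    rcases (PySem.Dict.mem_items_insert d l (List.replicate 7 0) e).mp he with h1 | h2
    · rw [h1]
    · exact h e h2.1

-- A's inner per-letter computation equals accF on the zero vector
theorem patternA_eq (letter : String) (cpd : List (String × List Int)) :
    (cpd.foldl (fun acc cv =>
      match PySem.Str.pyGet? cv.1 0 with
      | some c => if String.ofList [c] == letter then acc ++ [cv.2] else acc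
      | none => acc) []).foldl (fun p v => pyZipSum p v) (List.replicate 7 0)
    = accF letter (List.replicate 7 0) cpd := by
  have h1 : cpd.foldl (fun acc cv =>
      match PySem.Str.pyGet? cv.1 0 with
      | some c => if String.ofList [c] == letter then acc ++ [cv.2] else acc
      | none => acc) []
      = cpd.foldl (fun acc cv => if matchB letter cv then acc ++ [cv.2] else acc) [] := by
    apply PySem.List.foldl_congr_mem
    intro acc cv _
    unfold matchB
    rcases hc : PySem.Str.pyGet? cv.1 0 with _ | c <;> rfl
  rw [h1, PySem.List.foldl_append_if (matchB letter) (fun cv => cv.2)]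
  rw [List.nil_append, List.foldl_map]
  rfl

-- ===== VERDICT (by name: the statement is the Claim_ definition above) =====
theorem condense_patterns_spec : Claim_equal_condense_patterns := by
  intro letters cpd _ _
  unfold Spec_condense_patterns condense_patterns condense_patterns_alt
  simp only []
  have hnodup : (letters.foldl (fun (d : PySem.Dict String (List Int)) l =>
      d.insert l (List.replicate 7 0)) PySem.Dict.empty).keys.Nodup :=
    PySem.Dict.nodup_keys_foldl_insert letters (fun _ _ => List.replicate 7 0) PySem.Dict.empty
      PySem.Dict.nodup_keys_empty
  rw [mainB cpd _ hnodup]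
  have hB : (letters.foldl (fun (d : PySem.Dict String (List Int)) l =>
        d.insert l (List.replicate 7 0)) PySem.Dict.empty).items.map
        (fun e => (e.1, accF e.1 e.2 cpd))
      = (letters.foldl (fun (d : PySem.Dict String (List Int)) l =>
        d.insert l (List.replicate 7 0)) PySem.Dict.empty).items.map
        (fun e => (e.1, accF e.1 (List.replicate 7 0) cpd)) := by
    apply List.map_congr_left
    intro e he
    rw [init_vals letters PySem.Dict.empty (by simp [PySem.Dict.items, PySem.Dict.empty]) e he]
  rw [hB]
  have hA : letters.foldl (fun (pattern_dict : PySem.Dict String (List Int)) letter =>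
      pattern_dict.insert letter
        ((cpd.foldl (fun acc cv =>
          match PySem.Str.pyGet? cv.1 0 with
          | some c => if String.ofList [c] == letter then acc ++ [cv.2] else acc
          | none => acc) []).foldl (fun p v => pyZipSum p v) (List.replicate 7 0))) PySem.Dict.empty
      = letters.foldl (fun pd l => pd.insert l (accF l (List.replicate 7 0) cpd)) PySem.Dict.empty := by
    apply PySem.List.foldl_congr_mem
    intro pd letter _
    rw [patternA_eq]
  rw [hA]
  exact mainA (fun l => accF l (List.replicate 7 0) cpd) letters PySem.Dict.empty PySem.Dict.empty
    (by simp [PySem.Dict.items, PySem.Dict.empty])
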